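-- pv_equiv track=rewrite | github.com/flace/sentiment-analysis | server/response_generator.py | generate_donut_data
-- ===== SOURCE A (Python) =====
-- def generate_donut_data(scores):
--     pos_count = 0
--     neg_count = 0
--     neutr_count = 0
--     for score in scores:
--         if score > 0:
--             pos_count += 1
--         elif score < 0:
--             neg_count += 1
--         else:
--             neutr_count += 1
--     return "[\
--     {\"key\": \"Positive\", \"y\": " + str(pos_count) + "},\
--     {\"key\": \"Neutral\", \"y\": " + str(neutr_count) + "},\
--     {\"key\": \"Negative\", \"y\": " + str(neg_count) + "}]"
-- ===== SOURCE B (Python) =====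
-- def _first_nonneg(xs):
--     # index of the first element >= 0 in an ascending list (len(xs) if none)
--     for i, v in enumerate(xs):
--         if v >= 0:
--             return i
--     return len(xs)
--
--
-- def _first_positive(xs):
--     # index of the first element > 0 in an ascending list (len(xs) if none)
--     for i, v in enumerate(xs):
--         if v > 0:
--             return i
--     return len(xs)
--
--
-- def generate_donut_data(scores):
--     xs = sorted(scores)
--     n = len(xs)
--     lo = _first_nonneg(xs)   # negatives occupy xs[:lo]
--     hi = _first_positive(xs)  # positives occupy xs[hi:]
--     neg = lo
--     neutr = hi - lo
--     pos = n - hi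
--     return ("[    {\"key\": \"Positive\", \"y\": " + str(pos) +
--             "},    {\"key\": \"Neutral\", \"y\": " + str(neutr) +
--             "},    {\"key\": \"Negative\", \"y\": " + str(neg) + "}]")
-- ===== Notes on version B (the rewrite author's own statement) =====
-- stated objective: alternative
-- what changed: Instead of counting with a three-way branch, B sorts the scores and locates the two sign boundaries (first element >= 0 and first element > 0) by early-exit scans, reading the three bucket sizes off the boundary indices.
import Mathlib
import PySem

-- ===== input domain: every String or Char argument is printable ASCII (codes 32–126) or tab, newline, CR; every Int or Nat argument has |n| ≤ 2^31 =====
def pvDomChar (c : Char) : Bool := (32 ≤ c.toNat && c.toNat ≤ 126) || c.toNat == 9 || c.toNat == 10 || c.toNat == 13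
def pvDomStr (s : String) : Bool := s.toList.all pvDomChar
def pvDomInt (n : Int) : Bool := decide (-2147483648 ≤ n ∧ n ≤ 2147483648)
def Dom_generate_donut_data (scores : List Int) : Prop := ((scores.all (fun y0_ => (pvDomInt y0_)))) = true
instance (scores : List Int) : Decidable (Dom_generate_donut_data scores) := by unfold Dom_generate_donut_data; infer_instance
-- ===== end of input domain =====

-- B sorts the scores and reads the bucket sizes off the two sign boundaries instead of counting with a three-way branch (objective: alternative).
-- ===== PORT A =====
-- literal port of A: one pass with a three-way branch accumulating (pos, neg, neutr)
def generate_donut_data (scores : List Int) : String :=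
  let st := scores.foldl (fun (st : Int × Int × Int) score =>
      if score > 0 then (st.1 + 1, st.2.1, st.2.2)
      else if score < 0 then (st.1, st.2.1 + 1, st.2.2)
      else (st.1, st.2.1, st.2.2 + 1)) (0, 0, 0)
  "[    {\"key\": \"Positive\", \"y\": " ++ PySem.Int.toStr st.1 ++
    "},    {\"key\": \"Neutral\", \"y\": " ++ PySem.Int.toStr st.2.2 ++
    "},    {\"key\": \"Negative\", \"y\": " ++ PySem.Int.toStr st.2.1 ++ "}]"

-- ===== PORT B =====
-- early-exit scan for the first index with v >= 0 (structural recursion form of Source B's enumerate loop)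
def pvFirstNonneg : List Int → Nat
  | [] => 0
  | v :: t => if v ≥ 0 then 0 else pvFirstNonneg t + 1

-- early-exit scan for the first index with v > 0
def pvFirstPositive : List Int → Nat
  | [] => 0
  | v :: t => if v > 0 then 0 else pvFirstPositive t + 1

-- B: sort, then read the three bucket sizes off the two sign-boundary indices
def generate_donut_data_alt (scores : List Int) : String :=
  let xs := PySem.List.sorted scores (fun x => x) false
  let n : Int := (xs.length : Int)
  let lo : Int := (pvFirstNonneg xs : Int)
  let hi : Int := (pvFirstPositive xs : Int)
  let neg := lo
  let neutr := hi - lo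
  let pos := n - hi
  "[    {\"key\": \"Positive\", \"y\": " ++ PySem.Int.toStr pos ++
    "},    {\"key\": \"Neutral\", \"y\": " ++ PySem.Int.toStr neutr ++
    "},    {\"key\": \"Negative\", \"y\": " ++ PySem.Int.toStr neg ++ "}]"

-- ===== PRECONDITION & SPEC =====
def Spec_generate_donut_data (scores : List Int) (out : String) : Prop := out = generate_donut_data_alt scores
instance (scores : List Int) (out : String) : Decidable (Spec_generate_donut_data scores out) := by unfold Spec_generate_donut_data; infer_instance

-- ===== CLAIM =====
def Claim_equal_generate_donut_data : Prop := ∀ (scores : List Int), Dom_generate_donut_data scores → Spec_generate_donut_data scores (generate_donut_data scores)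

-- ===== LEMMAS AND PROOFS =====

def pvN (xs : List Int) : Nat := (xs.filter (fun v => decide (v < 0))).length
def pvZ (xs : List Int) : Nat := (xs.filter (fun v => decide (v = 0))).length
def pvP (xs : List Int) : Nat := (xs.filter (fun v => decide (v > 0))).length

lemma pvFold_char (scores : List Int) (a b c : Int) :
    scores.foldl (fun (st : Int × Int × Int) score =>
      if score > 0 then (st.1 + 1, st.2.1, st.2.2)
      else if score < 0 then (st.1, st.2.1 + 1, st.2.2)
      else (st.1, st.2.1, st.2.2 + 1)) (a, b, c)
    = (a + (pvP scores : Int), b + (pvN scores : Int), c + (pvZ scores : Int)) := by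
  induction scores generalizing a b c with
  | nil => simp [pvP, pvN, pvZ]
  | cons x xs ih =>
    simp only [List.foldl_cons]
    split_ifs with h1 h2 <;>
      · rw [ih]
        simp only [pvP, pvN, pvZ, List.filter_cons]
        split_ifs <;> simp_all <;> omega

lemma pvFirstNonneg_sorted (xs : List Int) (h : xs.Pairwise (· ≤ ·)) :
    pvFirstNonneg xs = pvN xs := by
  induction xs with
  | nil => rfl
  | cons x t ih =>
    rcases List.pairwise_cons.mp h with ⟨hx, ht⟩
    by_cases hx0 : x ≥ 0
    · have : pvN (x :: t) = 0 := by
        simp only [pvN, List.length_eq_zero_iff, List.filter_eq_nil_iff]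
        intro v hv
        rcases List.mem_cons.mp hv with rfl | hv
        · simp; omega
        · have := hx v hv; simp; omega
      simp [pvFirstNonneg, hx0, this]
    · have hxlt : x < 0 := by omega
      simp only [pvFirstNonneg, if_neg hx0, ih ht, pvN, List.filter_cons]
      have : decide (x < 0) = true := by simp [hxlt]
      simp [this, Nat.add_comm]

lemma pvFirstPositive_sorted (xs : List Int) (h : xs.Pairwise (· ≤ ·)) :
    pvFirstPositive xs = pvN xs + pvZ xs := by
  induction xs with
  | nil => rfl
  | cons x t ih =>
    rcases List.pairwise_cons.mp h with ⟨hx, ht⟩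
    by_cases hx0 : x > 0
    · have hN : pvN (x :: t) = 0 := by
        simp only [pvN, List.length_eq_zero_iff, List.filter_eq_nil_iff]
        intro v hv
        rcases List.mem_cons.mp hv with rfl | hv
        · simp; omega
        · have := hx v hv; simp; omega
      have hZ : pvZ (x :: t) = 0 := by
        simp only [pvZ, List.length_eq_zero_iff, List.filter_eq_nil_iff]
        intro v hv
        rcases List.mem_cons.mp hv with rfl | hv
        · simp; omega
        · have := hx v hv; simp; omega
      simp [pvFirstPositive, hx0, hN, hZ]
    · simp only [pvFirstPositive, if_neg hx0, ih ht, pvN, pvZ, List.filter_cons]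
      by_cases hlt : x < 0
      · have h1 : decide (x < 0) = true := by simp [hlt]
        have h2 : decide (x = 0) = false := by simp; omega
        simp [h1, h2]; omega
      · have hz : x = 0 := by omega
        simp [hz]; omega

lemma pvLen_split (xs : List Int) : pvN xs + pvZ xs + pvP xs = xs.length := by
  induction xs with
  | nil => rfl
  | cons x t ih =>
    simp only [pvN, pvZ, pvP, List.filter_cons, List.length_cons] at *
    split_ifs <;> simp_all <;> omega

lemma pvCounts_perm (xs ys : List Int) (h : xs.Perm ys) :
    pvN xs = pvN ys ∧ pvZ xs = pvZ ys ∧ pvP xs = pvP ys :=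
  ⟨(h.filter _).length_eq, (h.filter _).length_eq, (h.filter _).length_eq⟩

-- ===== VERDICT =====
theorem generate_donut_data_spec : Claim_equal_generate_donut_data := by
  intro scores _
  unfold Spec_generate_donut_data generate_donut_data generate_donut_data_alt
  rw [show (0, 0, 0) = ((0 : Int), (0 : Int), (0 : Int)) from rfl, pvFold_char]
  set xs := PySem.List.sorted scores (fun x => x) false with hxs
  have hperm : xs.Perm scores := PySem.List.sorted_perm scores (fun x => x) false
  have hpw : xs.Pairwise (· ≤ ·) := by
    have := PySem.List.sorted_pairwise (xs := scores) (key := fun x => x)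
    simpa using this
  obtain ⟨hN, hZ, hP⟩ := pvCounts_perm xs scores hperm
  have hlo := pvFirstNonneg_sorted xs hpw
  have hhi := pvFirstPositive_sorted xs hpw
  have hlen := pvLen_split xs
  have hlens : xs.length = scores.length := hperm.length_eq
  have e1 : (0:Int) + (pvP scores : Int) = (xs.length : Int) - (pvFirstPositive xs : Int) := by omega
  have e2 : (0:Int) + (pvZ scores : Int) = (pvFirstPositive xs : Int) - (pvFirstNonneg xs : Int) := by omega
  have e3 : (0:Int) + (pvN scores : Int) = ((pvFirstNonneg xs : Int)) := by omega
  simp only []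
  rw [e1, e2, e3]
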